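-- pv_equiv track=rewrite | github.com/weselyj/Clarity-OMR-Train-RADIO | src/pipeline/assemble_score.py | _is_inside_chord
-- ===== SOURCE A (Python) =====
-- from typing import Dict, Iterable, List, Optional, Sequence, Tuple
--
-- def _is_inside_chord(tokens: List[str], idx: int) -> bool:
--     """Check if the token at idx is inside a <chord_start>...<chord_end> block."""
--     depth = 0
--     for i in range(idx):
--         if tokens[i] == "<chord_start>":
--             depth += 1
--         elif tokens[i] == "<chord_end>":
--             depth -= 1
--     return depth > 0
-- ===== SOURCE B (Python) =====
-- def _is_inside_chord(tokens, idx):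
--     """Check if the token at idx is inside a <chord_start>...<chord_end> block."""
--     def balance(lo, hi):
--         if hi - lo <= 0:
--             return 0
--         if hi - lo == 1:
--             t = tokens[lo]
--             if t == "<chord_start>":
--                 return 1
--             if t == "<chord_end>":
--                 return -1
--             return 0
--         mid = (lo + hi) // 2
--         return balance(lo, mid) + balance(mid, hi)
--     return balance(0, idx) > 0
-- ===== Notes on version B (the rewrite author's own statement) =====
-- stated objective: alternative
-- what changed: Replaces A's single left-to-right depth-accumulator loop by a divide-and-conquer recursion that computes the prefix balance by splitting the index range [0, idx) at its floor midpoint and summing the balances of the two halves.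
import Mathlib
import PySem

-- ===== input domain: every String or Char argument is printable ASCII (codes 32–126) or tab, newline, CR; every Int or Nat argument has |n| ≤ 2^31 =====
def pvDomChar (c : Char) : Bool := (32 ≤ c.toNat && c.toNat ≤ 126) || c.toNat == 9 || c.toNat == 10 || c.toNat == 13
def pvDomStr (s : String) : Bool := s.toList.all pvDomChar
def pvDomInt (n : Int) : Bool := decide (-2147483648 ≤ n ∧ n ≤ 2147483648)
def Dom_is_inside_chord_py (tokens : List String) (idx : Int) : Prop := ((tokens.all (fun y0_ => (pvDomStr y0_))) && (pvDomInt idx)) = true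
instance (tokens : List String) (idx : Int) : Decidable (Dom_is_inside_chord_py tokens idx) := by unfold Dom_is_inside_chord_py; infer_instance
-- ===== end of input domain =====

-- B computes the prefix balance by divide-and-conquer over the index range instead of
-- A's single left-to-right accumulator loop (alternative decomposition; same cost).


-- ===== PORT A =====
-- for i in range(idx): depth ±= 1 on the markers; tokens[i] via pyGetD (in range under Pre_)
def is_inside_chord_py (tokens : List String) (idx : Int) : Bool :=
  let depth : Int :=
    (PySem.List.pyRange 0 idx 1).foldl
      (fun depth i =>
        if PySem.List.pyGetD tokens i "" = "<chord_start>" then depth + 1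
        else if PySem.List.pyGetD tokens i "" = "<chord_end>" then depth - 1
        else depth) 0
  depth > 0

-- ===== PORT B =====
-- balance(lo, hi): divide and conquer on the half-open index range [lo, hi);
-- tokens[lo] at a leaf via pyGetD (in range under Pre_ in every reached call)
def pvBalance (tokens : List String) (lo hi : Int) : Int :=
  if _h0 : hi - lo ≤ 0 then 0
  else if _h1 : hi - lo = 1 then
    if PySem.List.pyGetD tokens lo "" = "<chord_start>" then 1
    else if PySem.List.pyGetD tokens lo "" = "<chord_end>" then -1
    else 0
  else
    let mid := PySem.Int.floordiv (lo + hi) 2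
    pvBalance tokens lo mid + pvBalance tokens mid hi
termination_by (hi - lo).toNat
decreasing_by
  all_goals
    have h2 : lo + 1 ≤ PySem.Int.floordiv (lo + hi) 2 :=
      (PySem.Int.le_floordiv_iff_mul_le (by omega)).2 (by omega)
    have h3 : PySem.Int.floordiv (lo + hi) 2 < hi :=
      (PySem.Int.floordiv_lt_iff_lt_mul (by omega)).2 (by omega)
    omega

def is_inside_chord_py_alt (tokens : List String) (idx : Int) : Bool :=
  pvBalance tokens 0 idx > 0

-- ===== PRECONDITION & SPEC =====
-- A raises IndexError when idx > len(tokens); exactly those inputs are excluded.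
def Pre_is_inside_chord_py (tokens : List String) (idx : Int) : Prop :=
  idx ≤ PySem.List.len tokens
instance (tokens : List String) (idx : Int) : Decidable (Pre_is_inside_chord_py tokens idx) := by
  unfold Pre_is_inside_chord_py; infer_instance
def pvWitness_is_inside_chord_py : List String × Int := (["<chord_start>", "x"], 1)

def Spec_is_inside_chord_py (tokens : List String) (idx : Int) (out : Bool) : Prop :=
  out = is_inside_chord_py_alt tokens idx
instance (tokens : List String) (idx : Int) (out : Bool) : Decidable (Spec_is_inside_chord_py tokens idx out) := by
  unfold Spec_is_inside_chord_py; infer_instance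

-- ===== CLAIM =====
def Claim_equal_is_inside_chord_py : Prop := ∀ (tokens : List String) (idx : Int), Dom_is_inside_chord_py tokens idx → Pre_is_inside_chord_py tokens idx → Spec_is_inside_chord_py tokens idx (is_inside_chord_py tokens idx)

-- ===== LEMMAS AND PROOFS =====

-- the per-token delta both programs effectively sum
def pvDelta (t : String) : Int :=
  if t = "<chord_start>" then 1 else if t = "<chord_end>" then -1 else 0

-- A's accumulator over any index list is the initial value plus the delta sum
lemma a_fold_eq_sum (tokens : List String) (L : List Int) (d : Int) :
    L.foldl
      (fun depth i =>
        if PySem.List.pyGetD tokens i "" = "<chord_start>" then depth + 1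
        else if PySem.List.pyGetD tokens i "" = "<chord_end>" then depth - 1
        else depth) d
    = d + (L.map (fun i => pvDelta (PySem.List.pyGetD tokens i ""))).sum := by
  induction L generalizing d with
  | nil => simp
  | cons x xs ih =>
    simp only [List.foldl_cons, List.map_cons, List.sum_cons, ih, pvDelta]
    split_ifs <;> ring

-- B's divide-and-conquer balance is the delta sum over the same index range
lemma balance_eq_sum (tokens : List String) (lo hi : Int) :
    pvBalance tokens lo hi
    = ((PySem.List.pyRange lo hi 1).map (fun i => pvDelta (PySem.List.pyGetD tokens i ""))).sum := by
  fun_induction pvBalance tokens lo hi with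
  | case1 lo hi h0 =>
    rw [PySem.List.pyRange_one_eq_nil (by omega)]; simp
  | case5 lo hi h0 h1 mid ih1 ih2 =>
    have hmid : mid = PySem.Int.floordiv (lo + hi) 2 := rfl
    have hb := PySem.Int.floordiv_two_mid_bounds (lo := lo) (hi := hi) (by omega)
    rw [PySem.List.pyRange_one_append lo mid hi (by omega) (by omega),
        List.map_append, List.sum_append, ih1, ih2]
  | case2 lo hi h0 h1 hs =>
    have hhi : hi = lo + 1 := by omega
    subst hhi
    rw [PySem.List.pyRange_one_singleton]
    simp [pvDelta, hs]
  | case3 lo hi h0 h1 hns he =>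
    have hhi : hi = lo + 1 := by omega
    subst hhi
    rw [PySem.List.pyRange_one_singleton]
    simp [pvDelta, he]
  | case4 lo hi h0 h1 hns hne =>
    have hhi : hi = lo + 1 := by omega
    subst hhi
    rw [PySem.List.pyRange_one_singleton]
    simp [pvDelta, hns, hne]

-- ===== VERDICT =====
theorem is_inside_chord_py_spec : Claim_equal_is_inside_chord_py := by
  intro tokens idx _ _
  unfold Spec_is_inside_chord_py is_inside_chord_py is_inside_chord_py_alt
  rw [a_fold_eq_sum, balance_eq_sum]
  simp
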